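-- pv_equiv track=rewrite | github.com/identikey/dcypher | python-prototype/src/dcypher/hdprint/patterns.py | generate_nchar_patterns
-- ===== SOURCE A (Python) =====
-- from typing import List, Optional, Dict
--
-- def generate_nchar_patterns(n: int) -> List[List[int]]:
--     """
--     Generate all patterns that sum to n characters.
--
--     This generates all integer partitions of n, useful for finding
--     patterns with specific total character counts.
--
--     Args:
--         n: Total number of characters
--
--     Returns:
--         List of patterns (each pattern is a list of integers)
--
--     Example:
--         >>> generate_nchar_patterns(4)
--         [[4], [3, 1], [2, 2], [2, 1, 1], [1, 1, 1, 1]]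
--     """
--
--     def generate_partitions(n: int, max_val: Optional[int] = None) -> List[List[int]]:
--         """Generate all integer partitions of n."""
--         if max_val is None:
--             max_val = n
--
--         if n == 0:
--             return [[]]
--
--         partitions = []
--         for i in range(min(max_val, n), 0, -1):
--             for partition in generate_partitions(n - i, i):
--                 partitions.append([i] + partition)
--
--         return partitions
--
--     return generate_partitions(n)
-- ===== SOURCE B (Python) =====
-- def generate_nchar_patterns(n: int):
--     """Generate all integer partitions of n (parts non-increasing),
--     via DFS with a shared mutable prefix: each partition is materialized
--     once at the leaf instead of being rebuilt by concatenation at every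
--     recursion level."""
--     result = []
--     prefix = []
--
--     def dfs(remaining, max_val):
--         if remaining == 0:
--             result.append(prefix.copy())
--             return
--         top = max_val if max_val < remaining else remaining
--         for i in range(top, 0, -1):
--             prefix.append(i)
--             dfs(remaining - i, i)
--             prefix.pop()
--
--     dfs(n, n)
--     return result
-- ===== Notes on version B (the rewrite author's own statement) =====
-- stated objective: alternative
-- what changed: A rebuilds every partition by [i]+partition list concatenations at each recursion level as results bubble up; B does a DFS with a shared mutable prefix (append/recurse/pop) and copies each finished partition once at the leaf into a single result accumulator.
import Mathlib
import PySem

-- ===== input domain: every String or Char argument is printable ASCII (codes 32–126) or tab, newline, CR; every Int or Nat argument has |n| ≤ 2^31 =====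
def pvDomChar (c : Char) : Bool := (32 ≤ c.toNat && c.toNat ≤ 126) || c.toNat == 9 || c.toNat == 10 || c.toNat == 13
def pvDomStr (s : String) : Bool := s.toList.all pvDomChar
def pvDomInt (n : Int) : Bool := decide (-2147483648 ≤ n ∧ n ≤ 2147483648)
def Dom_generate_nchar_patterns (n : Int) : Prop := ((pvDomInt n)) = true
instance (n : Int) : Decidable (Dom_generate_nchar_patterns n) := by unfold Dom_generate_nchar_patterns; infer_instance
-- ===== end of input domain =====

-- B replaces A's per-level list concatenations with a DFS over a shared pfx that
-- materializes each partition once at the leaf instead (objective: alternative algorithm).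

-- ===== PORT A =====
-- inner helper generate_partitions(n, max_val): builds the result list bottom-up,
-- prepending [i] to every partition returned by the recursive call.
def generate_partitions (n : Int) (maxVal : Int) : List (List Int) :=
  if n = 0 then [[]]
  else
    (PySem.List.pyRange (min maxVal n) 0 (-1)).attach.foldl
      (fun acc i => acc ++ (generate_partitions (n - i.1) i.1).map (fun p => i.1 :: p)) []
termination_by n.toNat
decreasing_by
  have h := PySem.List.mem_pyRange_neg_one.mp i.2
  omega

def generate_nchar_patterns (n : Int) : List (List Int) :=
  generate_partitions n n

-- ===== PORT B =====
-- dfs(remaining, max_val): result and pfx threaded as accumulators; each finished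
-- partition is appended to result once, at the leaf.
def pv_dfs (remaining : Int) (maxVal : Int) (pfx : List Int)
    (result : List (List Int)) : List (List Int) :=
  if remaining = 0 then result ++ [pfx]
  else
    -- top = max_val if max_val < remaining else remaining, inlined into the range bound
    (PySem.List.pyRange (if maxVal < remaining then maxVal else remaining) 0 (-1)).attach.foldl
      (fun res i => pv_dfs (remaining - i.1) i.1 (pfx ++ [i.1]) res) result
termination_by remaining.toNat
decreasing_by
  have h := PySem.List.mem_pyRange_neg_one.mp i.2
  split at h <;> omega

def generate_nchar_patterns_alt (n : Int) : List (List Int) :=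
  pv_dfs n n [] []

-- ===== PRECONDITION & SPEC =====
def Spec_generate_nchar_patterns (n : Int) (out : List (List Int)) : Prop := out = generate_nchar_patterns_alt n
instance (n : Int) (out : List (List Int)) : Decidable (Spec_generate_nchar_patterns n out) := by unfold Spec_generate_nchar_patterns; infer_instance

-- ===== CLAIM (what is proved, stated in full; the proofs are below) =====
def Claim_equal_generate_nchar_patterns : Prop := ∀ (n : Int), Dom_generate_nchar_patterns n → Spec_generate_nchar_patterns n (generate_nchar_patterns n)

-- ===== LEMMAS AND PROOFS =====

-- List.foldl_attach with explicit arguments, so `rw` can apply it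
theorem pv_foldl_attach {α β : Type} (l : List α) (f : β → α → β) (b : β) :
    l.attach.foldl (fun acc t => f acc t.1) b = l.foldl f b := List.foldl_attach

-- attach-free unfolding of A's helper, with the foldl of appends turned into flatMap
theorem generate_partitions_eq (n maxVal : Int) :
    generate_partitions n maxVal =
      if n = 0 then [[]]
      else (PySem.List.pyRange (min maxVal n) 0 (-1)).flatMap
        (fun i => (generate_partitions (n - i) i).map (fun p => i :: p)) := by
  rw [generate_partitions]
  split
  · rfl
  · rw [pv_foldl_attach _ (fun acc j => acc ++ (generate_partitions (n - j) j).map (fun p => j :: p)),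
      PySem.List.foldl_append_eq_flatMap, List.nil_append]

-- attach-free unfolding of B's dfs
theorem pv_dfs_eq (remaining maxVal : Int) (pfx : List Int) (result : List (List Int)) :
    pv_dfs remaining maxVal pfx result =
      if remaining = 0 then result ++ [pfx]
      else (PySem.List.pyRange (min maxVal remaining) 0 (-1)).foldl
        (fun res i => pv_dfs (remaining - i) i (pfx ++ [i]) res) result := by
  rw [pv_dfs]
  split
  · rfl
  · rw [pv_foldl_attach _ (fun res j => pv_dfs (remaining - j) j (pfx ++ [j]) res)]
    have : (if maxVal < remaining then maxVal else remaining) = min maxVal remaining := by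
      simp [min_def]; omega
    rw [this]

-- main invariant: B's dfs appends to `result` exactly A's partitions, each prefixed
theorem pv_dfs_spec (k : Nat) : ∀ (r m : Int), r.toNat ≤ k →
    ∀ (pfx : List Int) (result : List (List Int)),
      pv_dfs r m pfx result
        = result ++ (generate_partitions r m).map (fun p => pfx ++ p) := by
  induction k with
  | zero =>
    intro r m hr pfx result
    rw [pv_dfs_eq, generate_partitions_eq]
    by_cases h0 : r = 0
    · simp [h0]
    · have hneg : min m r ≤ 0 := by omega
      rw [PySem.List.pyRange_neg_one_eq_nil hneg]
      simp [h0]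
  | succ k ih =>
    intro r m hr pfx result
    rw [pv_dfs_eq, generate_partitions_eq]
    by_cases h0 : r = 0
    · simp [h0]
    · simp only [if_neg h0]
      -- fold over the same countdown range on both sides
      generalize hL :  PySem.List.pyRange (min m r) 0 (-1) = L
      have hmem : ∀ i ∈ L, 0 < i ∧ i ≤ min m r := by
        intro i hi
        rw [← hL] at hi
        have := PySem.List.mem_pyRange_neg_one.mp hi
        exact ⟨this.1, this.2⟩
      clear hL
      induction L generalizing result with
      | nil => simp
      | cons i L' ihL =>
        have hi := hmem i (by simp)
        have hrec : ∀ (p : List Int) (q : List (List Int)),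
            pv_dfs (r - i) i p q = q ++ (generate_partitions (r - i) i).map (fun t => p ++ t) :=
          fun p q => ih (r - i) i (by omega) p q
        simp only [List.foldl_cons, List.flatMap_cons, hrec]
        rw [ihL _ (fun j hj => hmem j (List.mem_cons_of_mem _ hj))]
        simp [List.map_map, Function.comp_def, List.append_assoc]

-- ===== VERDICT (by name: the statement is the Claim_ definition above) =====
theorem generate_nchar_patterns_spec : Claim_equal_generate_nchar_patterns := by
  intro n _
  unfold Spec_generate_nchar_patterns generate_nchar_patterns generate_nchar_patterns_alt
  rw [pv_dfs_spec n.toNat n n le_rfl]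
  simp
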